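-- pv_equiv track=rewrite | github.com/sabi-h/nova-p | nova/onthemarket/transform.py | extract_outward_code
-- ===== SOURCE A (Python) =====
-- def extract_outward_code(text, outward_codes):
--     text = text if text else ''
--
--     found_codes = []
--     for outward_code in outward_codes:
--         if outward_code in text:
--             found_codes.append(outward_code)
--
--     no_of_outward_codes = len(found_codes)
--
--     if no_of_outward_codes == 0:
--         result = None
--
--     elif no_of_outward_codes == 1:
--         result = found_codes[0]
--
--     else:
--         result = max(found_codes, key=len)
--
--     return result
-- ===== SOURCE B (Python) =====
-- def extract_outward_code(text, outward_codes):
--     text = text if text else ''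
--     for code in sorted(outward_codes, key=len, reverse=True):
--         if code in text:
--             return code
--     return None
-- ===== Notes on version B (the rewrite author's own statement) =====
-- stated objective: alternative
-- what changed: Stable-sorts the candidate codes by length descending and returns the first one that is a substring (early exit), instead of filtering all matches into a list, branching on its count and taking max(key=len); sort stability reproduces A's first-longest tie-break.
import Mathlib
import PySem

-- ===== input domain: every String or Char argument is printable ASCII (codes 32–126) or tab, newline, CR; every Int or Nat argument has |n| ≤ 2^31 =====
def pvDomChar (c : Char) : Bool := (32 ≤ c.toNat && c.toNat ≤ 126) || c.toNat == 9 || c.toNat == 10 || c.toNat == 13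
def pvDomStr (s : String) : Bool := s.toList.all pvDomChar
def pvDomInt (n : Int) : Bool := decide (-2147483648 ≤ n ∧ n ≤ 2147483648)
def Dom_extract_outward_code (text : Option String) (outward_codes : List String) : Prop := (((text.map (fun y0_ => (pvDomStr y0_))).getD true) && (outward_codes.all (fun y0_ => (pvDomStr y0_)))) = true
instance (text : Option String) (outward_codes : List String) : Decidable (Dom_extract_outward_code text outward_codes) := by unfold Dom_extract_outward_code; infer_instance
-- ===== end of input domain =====

-- B replaces A's filter-into-list / count / 0-1-many branch / max(key=len) with a stable
-- descending sort by length followed by a first-match early-exit scan; sort stability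
-- reproduces A's first-longest tie-break, so the return values coincide.
-- ===== PORT A =====
def extract_outward_code (text : Option String) (outward_codes : List String) : Option String :=
  -- text = text if text else ''  (None and '' both become '')
  let t : String := text.getD ""
  -- found_codes accumulated by append, as in A's loop
  let found : List String :=
    outward_codes.foldl (fun acc c => if PySem.Str.isIn c t then acc ++ [c] else acc) []
  let n : Nat := found.length
  if n = 0 then none
  else if n = 1 then PySem.List.pyGet? found 0   -- found_codes[0] (in range since n = 1)
  else PySem.List.max? found PySem.Str.len        -- max(found_codes, key=len): first longest

-- ===== PORT B =====
def extract_outward_code_alt (text : Option String) (outward_codes : List String) : Option String :=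
  let t : String := text.getD ""
  -- for code in sorted(outward_codes, key=len, reverse=True): if code in t: return code
  (PySem.List.sorted outward_codes PySem.Str.len true).find? (fun c => PySem.Str.isIn c t)

-- ===== PRECONDITION & SPEC =====
def Spec_extract_outward_code (text : Option String) (outward_codes : List String) (out : Option String) : Prop := out = extract_outward_code_alt text outward_codes
instance (text : Option String) (outward_codes : List String) (out : Option String) : Decidable (Spec_extract_outward_code text outward_codes out) := by unfold Spec_extract_outward_code; infer_instance

-- ===== CLAIM (what is proved, stated in full; the proofs are below) =====
def Claim_equal_extract_outward_code : Prop := ∀ (text : Option String) (outward_codes : List String), Dom_extract_outward_code text outward_codes → Spec_extract_outward_code text outward_codes (extract_outward_code text outward_codes)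

-- ===== LEMMAS AND PROOFS =====

-- A's result is max(key=len) of the filtered list, in every branch.
lemma A_eq_max (text : Option String) (codes : List String) :
    extract_outward_code text codes =
      PySem.List.max? (codes.filter (fun c => PySem.Str.isIn c (text.getD ""))) PySem.Str.len := by
  simp only [extract_outward_code]
  set t := text.getD "" with ht
  rw [show (fun (acc : List String) (c : String) => if PySem.Str.isIn c t then acc ++ [c] else acc)
        = (fun acc c => if PySem.Str.isIn c t then acc ++ [(fun x => x) c] else acc) from rfl,
      PySem.List.foldl_append_if, List.map_id_fun', List.nil_append]
  rcases h : codes.filter (fun c => PySem.Str.isIn c t) with _ | ⟨c, rest⟩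
  · simp [PySem.List.max?]
  · rcases rest with _ | ⟨d, rest'⟩
    · simp [PySem.List.pyGet?, PySem.List.pyIdx?, PySem.List.max?]
    · simp [PySem.List.max?]

-- find? is the head of the filtered list.
lemma find?_eq_head?_filter {α : Type} (p : α → Bool) (l : List α) :
    l.find? p = (l.filter p).head? := by
  induction l with
  | nil => rfl
  | cons x xs ih =>
    rw [List.filter_cons]
    cases h : p x
    · rw [List.find?_cons_of_neg (by simp [h]), ih]; simp
    · rw [List.find?_cons_of_pos h]; simp

-- an element smaller (by key) than everything in the list is inserted at the front
lemma insertBy_cons_of_forall {α : Type} (bef : α → α → Bool) (x : α) (l : List α)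
    (h : ∀ z ∈ l, bef x z = true) :
    PySem.List.insertBy bef x l = x :: l := by
  cases l with
  | nil => rfl
  | cons z zs => simp [PySem.List.insertBy, h z (List.mem_cons_self)]

-- stable descending insertion preserves the descending order of the accumulator
lemma pairwise_insertBy {α κ : Type} [LinearOrder κ] (key : α → κ) (x : α) (acc : List α)
    (h : acc.Pairwise (fun a b => key b ≤ key a)) :
    (PySem.List.insertBy (fun a b => decide (key b < key a)) x acc).Pairwise
      (fun a b => key b ≤ key a) := by
  induction acc with
  | nil => simp [PySem.List.insertBy]
  | cons y ys ih =>
    rcases List.pairwise_cons.mp h with ⟨hy, hys⟩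
    by_cases hb : key y < key x
    · rw [show PySem.List.insertBy (fun a b => decide (key b < key a)) x (y :: ys)
            = x :: y :: ys by simp [PySem.List.insertBy, hb]]
      exact List.pairwise_cons.mpr ⟨by
        intro z hz
        rcases List.mem_cons.mp hz with rfl | hz'
        · exact le_of_lt hb
        · exact le_trans (hy z hz') (le_of_lt hb), h⟩
    · rw [show PySem.List.insertBy (fun a b => decide (key b < key a)) x (y :: ys)
            = y :: PySem.List.insertBy (fun a b => decide (key b < key a)) x ys
          by simp [PySem.List.insertBy, hb]]
      refine List.pairwise_cons.mpr ⟨?_, ih hys⟩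
      intro z hz
      rcases (PySem.List.mem_insertBy _ _ _ _).mp hz with rfl | hz'
      · exact le_of_not_gt hb
      · exact hy z hz'

-- filter commutes with a single stable descending insertion (needs the accumulator sorted)
lemma filter_insertBy {α κ : Type} [LinearOrder κ] (p : α → Bool) (key : α → κ)
    (x : α) (acc : List α) (hacc : acc.Pairwise (fun a b => key b ≤ key a)) :
    (PySem.List.insertBy (fun a b => decide (key b < key a)) x acc).filter p =
      if p x then PySem.List.insertBy (fun a b => decide (key b < key a)) x (acc.filter p)
      else acc.filter p := by
  induction acc with
  | nil => by_cases h : p x = true <;> simp [PySem.List.insertBy, h]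
  | cons y ys ih =>
    rcases List.pairwise_cons.mp hacc with ⟨hy, hys⟩
    by_cases hb : key y < key x
    · rw [show PySem.List.insertBy (fun a b => decide (key b < key a)) x (y :: ys)
            = x :: y :: ys by simp [PySem.List.insertBy, hb]]
      by_cases hx : p x = true
      · by_cases hpy : p y = true
        · simp [hx, hpy, PySem.List.insertBy, hb]
        · simp only [List.filter_cons, hx, hpy, if_pos, Bool.false_eq_true]
          rw [insertBy_cons_of_forall]
          intro z hz
          have hzy : key z ≤ key y := hy z (List.mem_of_mem_filter hz)
          simp [lt_of_le_of_lt hzy hb]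
      · simp [List.filter_cons, hx]
    · rw [show PySem.List.insertBy (fun a b => decide (key b < key a)) x (y :: ys)
            = y :: PySem.List.insertBy (fun a b => decide (key b < key a)) x ys
          by simp [PySem.List.insertBy, hb]]
      by_cases hpy : p y = true <;> by_cases hx : p x = true <;>
        simp [hpy, hx, ih hys, PySem.List.insertBy, hb]

-- filter commutes with the whole insertion-sort fold (accumulator kept sorted)
lemma filter_foldl_insertBy {α κ : Type} [LinearOrder κ] (p : α → Bool) (key : α → κ)
    (xs : List α) (acc : List α) (hacc : acc.Pairwise (fun a b => key b ≤ key a)) :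
    (xs.foldl (fun a x => PySem.List.insertBy (fun a b => decide (key b < key a)) x a) acc).filter p =
      (xs.filter p).foldl
        (fun a x => PySem.List.insertBy (fun a b => decide (key b < key a)) x a)
        (acc.filter p) := by
  induction xs generalizing acc with
  | nil => rfl
  | cons x xs ih =>
    rw [List.foldl_cons, ih _ (pairwise_insertBy key x acc hacc),
        filter_insertBy p key x acc hacc, List.filter_cons]
    by_cases hx : p x = true <;> simp [hx]

-- head of a stable descending insertion is the running first-max step.
lemma head?_insertBy {α κ : Type} [LinearOrder κ] (key : α → κ) (x : α) (acc : List α) :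
    (PySem.List.insertBy (fun a b => decide (key b < key a)) x acc).head? =
      (match acc.head? with
       | none => some x
       | some m => if key m < key x then some x else some m) := by
  cases acc with
  | nil => rfl
  | cons y ys =>
    by_cases h : key y < key x <;> simp [PySem.List.insertBy, h]

-- head of the insertion-sort fold is max?'s fold.
lemma head?_foldl_insertBy {α κ : Type} [LinearOrder κ] (key : α → κ)
    (zs acc : List α) :
    (zs.foldl (fun a x => PySem.List.insertBy (fun a b => decide (key b < key a)) x a) acc).head? =
      zs.foldl
        (fun acc x =>
          match acc with
          | none => some x
          | some m => if key m < key x then some x else some m)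
        acc.head? := by
  induction zs generalizing acc with
  | nil => rfl
  | cons z zs ih => rw [List.foldl_cons, ih, head?_insertBy, List.foldl_cons]

-- B's sort-then-first-match equals max(key=len) of the filtered original list.
lemma B_eq_max (text : Option String) (codes : List String) :
    extract_outward_code_alt text codes =
      PySem.List.max? (codes.filter (fun c => PySem.Str.isIn c (text.getD ""))) PySem.Str.len := by
  simp only [extract_outward_code_alt]
  rw [find?_eq_head?_filter, PySem.List.sorted_rev_eq_foldl_insertBy,
      filter_foldl_insertBy _ PySem.Str.len _ _ (by simp),
      show (([] : List String).filter _) = [] from rfl,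
      head?_foldl_insertBy]
  rfl

-- ===== VERDICT (by name: the statement is the Claim_ definition above) =====
theorem extract_outward_code_spec : Claim_equal_extract_outward_code := by
  intro text codes _
  show _ = _
  rw [A_eq_max, B_eq_max]
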